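-- pv_equiv track=rewrite | github.com/SWYZZWH/leetcode | python/no_2104/no_2104.py | caculateSubArraySum
-- ===== SOURCE A (Python) =====
-- from typing import List
--
-- def caculateSubArraySum(nums: List[int], getMin: bool):
--     ret = 0
--     stkLeft, stkRight = [], []
--     leftRange, rightRange = [0] * len(nums), [0] * len(nums)
--
--     for i, num in enumerate(nums):
--         while len(stkLeft) != 0 and (getMin and num < stkLeft[-1][0] or not getMin and num > stkLeft[-1][0]):
--             rightRange[stkLeft[-1][1]] = i - stkLeft[-1][1]
--             stkLeft = stkLeft[:-1]
--         stkLeft.append([num, i])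
--     while len(stkLeft) != 0:
--         rightRange[stkLeft[-1][1]] = len(nums) - stkLeft[-1][1]
--         stkLeft = stkLeft[:-1]
--
--     for i in reversed(range(len(nums))):
--         num = nums[i]
--         while len(stkRight) != 0 and (getMin and num <= stkRight[-1][0] or not getMin and num >= stkRight[-1][0]):
--             leftRange[stkRight[-1][1]] = stkRight[-1][1] - i
--             stkRight = stkRight[:-1]
--         stkRight.append([num, i])
--     while len(stkRight) != 0:
--         leftRange[stkRight[-1][1]] = stkRight[-1][1] + 1
--         stkRight = stkRight[:-1]
--
--
--     for i in range(len(nums)):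
--         ret += leftRange[i] * rightRange[i] * nums[i]
--
--     return ret
-- ===== SOURCE B (Python) =====
-- from typing import List
--
-- def caculateSubArraySum(nums: List[int], getMin: bool):
--     # For each index i, find directly the extent of subarrays whose min (resp. max)
--     # is attributed to nums[i]: scan left to the nearest index with value <= (resp. >=)
--     # nums[i], scan right to the nearest index with value strictly < (resp. >) nums[i].
--     n = len(nums)
--     ret = 0
--     for i in range(n):
--         x = nums[i]
--         l = i - 1
--         while l >= 0 and not (nums[l] <= x if getMin else nums[l] >= x):
--             l -= 1
--         r = i + 1
--         while r < n and not (nums[r] < x if getMin else nums[r] > x):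
--             r += 1
--         ret += (i - l) * (r - i) * x
--     return ret
-- ===== Notes on version B (the rewrite author's own statement) =====
-- stated objective: simpler
-- what changed: Replaced A's two monotonic-stack passes (which fill leftRange/rightRange tables and then multiply) by a single loop that, for each index, scans left to the nearest <= (resp. >=) element and right to the nearest strictly < (resp. >) element and adds the contribution directly, with no stacks or tables.
import Mathlib
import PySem

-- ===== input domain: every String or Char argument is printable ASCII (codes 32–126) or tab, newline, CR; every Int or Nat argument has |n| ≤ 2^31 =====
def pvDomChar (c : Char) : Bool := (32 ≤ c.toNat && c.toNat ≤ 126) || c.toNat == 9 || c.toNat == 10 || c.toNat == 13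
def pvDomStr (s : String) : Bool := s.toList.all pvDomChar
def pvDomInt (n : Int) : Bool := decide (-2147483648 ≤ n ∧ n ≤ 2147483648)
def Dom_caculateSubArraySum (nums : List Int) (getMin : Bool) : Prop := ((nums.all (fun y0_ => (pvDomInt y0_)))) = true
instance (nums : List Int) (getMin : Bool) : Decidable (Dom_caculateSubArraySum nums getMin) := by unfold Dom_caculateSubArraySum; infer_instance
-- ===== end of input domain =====

-- B replaces A's two monotonic-stack passes by direct per-index left/right scans
-- for the extent of subarrays attributed to each element (objective: simpler, not faster).

-- ===== PORT A =====
-- Python's `while stk and (getMin and num < stk[-1][0] or not getMin and num > stk[-1][0])`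
def popRight (getMin : Bool) (x v : Int) : Bool :=
  (getMin && decide (x < v)) || (!getMin && decide (x > v))
-- Python's `while stk and (getMin and num <= stk[-1][0] or not getMin and num >= stk[-1][0])`
def popLeft (getMin : Bool) (x v : Int) : Bool :=
  (getMin && decide (x ≤ v)) || (!getMin && decide (x ≥ v))

-- the inner `while` pop loops of A, factored: the stack keeps its top at the head;
-- `w j` is the value written into the range array when index j is popped
def popPhase (pop : Int → Int → Bool) (x : Int) (w : Nat → Int) :
    List (Int × Nat) → List Int → List (Int × Nat) × List Int
  | [], arr => ([], arr)
  | (v, j) :: rest, arr =>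
      if pop x v then popPhase pop x w rest (arr.set j (w j))
      else ((v, j) :: rest, arr)

-- one iteration of A's first (forward) loop body
def fwdStep (pop : Int → Int → Bool) (nums : List Int)
    (s : List (Int × Nat) × List Int) (i : Nat) : List (Int × Nat) × List Int :=
  let x := nums.getD i 0
  let t := popPhase pop x (fun j => (i : Int) - (j : Int)) s.1 s.2
  ((x, i) :: t.1, t.2)

-- A's first loop plus its flush loop: computes rightRange
def rightRangeA (pop : Int → Int → Bool) (nums : List Int) : List Int :=
  let s := (List.range nums.length).foldl (fwdStep pop nums)
             ([], List.replicate nums.length 0)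
  (popPhase (fun _ _ => true) 0 (fun j => (nums.length : Int) - (j : Int)) s.1 s.2).2

-- one iteration of A's second (backward) loop body
def bwdStep (pop : Int → Int → Bool) (nums : List Int)
    (s : List (Int × Nat) × List Int) (i : Nat) : List (Int × Nat) × List Int :=
  let x := nums.getD i 0
  let t := popPhase pop x (fun j => (j : Int) - (i : Int)) s.1 s.2
  ((x, i) :: t.1, t.2)

-- A's second loop (over reversed(range(n))) plus its flush loop: computes leftRange
def leftRangeA (pop : Int → Int → Bool) (nums : List Int) : List Int :=
  let s := ((List.range nums.length).reverse).foldl (bwdStep pop nums)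
             ([], List.replicate nums.length 0)
  (popPhase (fun _ _ => true) 0 (fun j => (j : Int) + 1) s.1 s.2).2

def caculateSubArraySum (nums : List Int) (getMin : Bool) : Int :=
  let rightRange := rightRangeA (popRight getMin) nums
  let leftRange := leftRangeA (popLeft getMin) nums
  (List.range nums.length).foldl
    (fun ret i => ret + leftRange.getD i 0 * rightRange.getD i 0 * nums.getD i 0) 0

-- ===== PORT B =====
def stopL (getMin : Bool) (v x : Int) : Bool := if getMin then decide (v ≤ x) else decide (v ≥ x)
def stopR (getMin : Bool) (v x : Int) : Bool := if getMin then decide (v < x) else decide (v > x)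

-- B's `while l >= 0 and not stop: l -= 1`, started at l = i-1 (argument is i); -1 if no stop
def scanL (nums : List Int) (x : Int) (getMin : Bool) : Nat → Int
  | 0 => -1
  | k + 1 => if stopL getMin (nums.getD k 0) x then (k : Int) else scanL nums x getMin k

-- B's `while r < n and not stop: r += 1`; fuel = n - r keeps r within range
def scanR (nums : List Int) (x : Int) (getMin : Bool) : Nat → Nat → Nat
  | 0, r => r
  | f + 1, r => if stopR getMin (nums.getD r 0) x then r else scanR nums x getMin f (r + 1)

def caculateSubArraySum_alt (nums : List Int) (getMin : Bool) : Int :=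
  (List.range nums.length).foldl (fun ret i =>
    let x := nums.getD i 0
    let l := scanL nums x getMin i
    let r := scanR nums x getMin (nums.length - (i + 1)) (i + 1)
    ret + ((i : Int) - l) * ((r : Int) - (i : Int)) * x) 0

-- ===== PRECONDITION & SPEC =====
def Spec_caculateSubArraySum (nums : List Int) (getMin : Bool) (out : Int) : Prop := out = caculateSubArraySum_alt nums getMin
instance (nums : List Int) (getMin : Bool) (out : Int) : Decidable (Spec_caculateSubArraySum nums getMin out) := by unfold Spec_caculateSubArraySum; infer_instance

-- ===== CLAIM (what is proved, stated in full; the proofs are below) =====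
def Claim_equal_caculateSubArraySum : Prop := ∀ (nums : List Int) (getMin : Bool), Dom_caculateSubArraySum nums getMin → Spec_caculateSubArraySum nums getMin (caculateSubArraySum nums getMin)

-- ===== LEMMAS AND PROOFS =====

-- array update facts used throughout
theorem pvGetD_set_ne (l : List Int) (i j : Nat) (v : Int) (h : i ≠ j) :
    (l.set i v).getD j 0 = l.getD j 0 := by
  simp [List.getD, List.getElem?_set_ne h]

theorem pvGetD_set_self (l : List Int) (i : Nat) (v : Int) (h : i < l.length) :
    (l.set i v).getD i 0 = v := by
  simp [List.getD, h]

-- generic forms of B's scanners, parametrized by the pop predicate (proof-only)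
def fpAux (pop : Int → Int → Bool) (nums : List Int) (vj : Int) : Nat → Nat → Nat
  | 0, r => r
  | f + 1, r => if pop (nums.getD r 0) vj then r else fpAux pop nums vj f (r + 1)

def fpop (pop : Int → Int → Bool) (nums : List Int) (j : Nat) : Nat :=
  fpAux pop nums (nums.getD j 0) (nums.length - (j + 1)) (j + 1)

def gpAux (pop : Int → Int → Bool) (nums : List Int) (vj : Int) : Nat → Int
  | 0 => -1
  | k + 1 => if pop (nums.getD k 0) vj then (k : Int) else gpAux pop nums vj k

def gpop (pop : Int → Int → Bool) (nums : List Int) (j : Nat) : Int :=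
  gpAux pop nums (nums.getD j 0) j

theorem stopR_eq_popRight (g : Bool) (a b : Int) : stopR g a b = popRight g a b := by
  cases g <;> simp [stopR, popRight]

theorem stopL_eq_popLeft (g : Bool) (a b : Int) : stopL g a b = popLeft g a b := by
  cases g <;> simp [stopL, popLeft]

theorem scanR_eq_fpAux (nums : List Int) (x : Int) (g : Bool) (f r : Nat) :
    scanR nums x g f r = fpAux (popRight g) nums x f r := by
  induction f generalizing r with
  | zero => simp [scanR, fpAux]
  | succ f ih => simp only [scanR, fpAux, stopR_eq_popRight]; split <;> simp [ih]

theorem scanL_eq_gpAux (nums : List Int) (x : Int) (g : Bool) (k : Nat) :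
    scanL nums x g k = gpAux (popLeft g) nums x k := by
  induction k with
  | zero => simp [scanL, gpAux]
  | succ k ih => simp only [scanL, gpAux, stopL_eq_popLeft]; split <;> simp [ih]

theorem fpAux_found (pop : Int → Int → Bool) (nums : List Int) (vj : Int) (m : Nat)
    (hm : m < nums.length) (hpm : pop (nums.getD m 0) vj = true) :
    ∀ f r, r + f = nums.length → r ≤ m →
      (∀ k, r ≤ k → k < m → pop (nums.getD k 0) vj = false) →
      fpAux pop nums vj f r = m := by
  intro f
  induction f with
  | zero => intro r h1 h2 _; omega
  | succ f ih =>
    intro r h1 h2 hno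
    simp only [fpAux]
    rcases Nat.eq_or_lt_of_le h2 with h | h
    · subst h; rw [hpm]; simp
    · rw [hno r le_rfl h]
      simp only [Bool.false_eq_true, if_false]
      exact ih (r + 1) (by omega) (by omega) (fun k hk1 hk2 => hno k (by omega) hk2)

theorem fpAux_none (pop : Int → Int → Bool) (nums : List Int) (vj : Int) :
    ∀ f r, r + f = nums.length →
      (∀ k, r ≤ k → k < nums.length → pop (nums.getD k 0) vj = false) →
      fpAux pop nums vj f r = nums.length := by
  intro f
  induction f with
  | zero => intro r h1 _; simpa [fpAux] using h1
  | succ f ih =>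
    intro r h1 hno
    simp only [fpAux]
    rw [hno r le_rfl (by omega)]
    simp only [Bool.false_eq_true, if_false]
    exact ih (r + 1) (by omega) (fun k hk1 hk2 => hno k (by omega) hk2)

theorem gpAux_found (pop : Int → Int → Bool) (nums : List Int) (vj : Int) (m : Nat)
    (hpm : pop (nums.getD m 0) vj = true) :
    ∀ k, m < k → (∀ t, m < t → t < k → pop (nums.getD t 0) vj = false) →
      gpAux pop nums vj k = (m : Int) := by
  intro k
  induction k with
  | zero => omega
  | succ k ih =>
    intro hm hno
    simp only [gpAux]
    rcases Nat.eq_or_lt_of_le (Nat.lt_succ_iff.mp hm) with h | h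
    · subst h; rw [hpm]; simp
    · rw [hno k h (by omega)]
      simp only [Bool.false_eq_true, if_false]
      exact ih h (fun t ht1 ht2 => hno t ht1 (by omega))

theorem gpAux_none (pop : Int → Int → Bool) (nums : List Int) (vj : Int) :
    ∀ k, (∀ t, t < k → pop (nums.getD t 0) vj = false) →
      gpAux pop nums vj k = -1 := by
  intro k
  induction k with
  | zero => intro _; simp [gpAux]
  | succ k ih =>
    intro hno
    simp only [gpAux]
    rw [hno k (by omega)]
    simp only [Bool.false_eq_true, if_false]
    exact ih (fun t ht => hno t (by omega))

-- loop invariant of A's forward pass (the state after processing indices < i)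
def FInv (pop : Int → Int → Bool) (nums : List Int) (i : Nat)
    (s : List (Int × Nat) × List Int) : Prop :=
  (∀ p ∈ s.1, p.2 < i ∧ p.1 = nums.getD p.2 0) ∧
  s.1.Pairwise (fun a b => b.2 < a.2) ∧
  s.1.Pairwise (fun a b => pop a.1 b.1 = false) ∧
  (∀ p ∈ s.1, ∀ k, p.2 < k → k < i → pop (nums.getD k 0) p.1 = false) ∧
  s.2.length = nums.length ∧
  (∀ j, j < i → (∀ p ∈ s.1, p.2 ≠ j) → s.2.getD j 0 = (fpop pop nums j : Int) - (j : Int))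

theorem popPhase_fwd (pop : Int → Int → Bool) (nums : List Int)
    (Htr : ∀ a b c : Int, pop a b = false → pop b c = false → pop a c = false)
    (i : Nat) (hi : i < nums.length) :
    ∀ stk arr, FInv pop nums i (stk, arr) →
      (∀ p ∈ (popPhase pop (nums.getD i 0) (fun j => (i : Int) - (j : Int)) stk arr).1,
          p ∈ stk ∧ pop (nums.getD i 0) p.1 = false) ∧
      FInv pop nums i (popPhase pop (nums.getD i 0) (fun j => (i : Int) - (j : Int)) stk arr) := by
  intro stk
  induction stk with
  | nil =>
    intro arr h
    simpa [popPhase] using h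
  | cons hd tl ih =>
    intro arr h
    obtain ⟨h1, h2, h3, h4, h5, h6⟩ := h
    obtain ⟨v, j⟩ := hd
    have h5' : arr.length = nums.length := h5
    by_cases hp : pop (nums.getD i 0) v = true
    · -- head is popped
      simp only [popPhase, hp, if_true]
      have hj : j < i := (h1 (v, j) (by simp)).1
      have hv : v = nums.getD j 0 := (h1 (v, j) (by simp)).2
      have harr' : FInv pop nums i (tl, arr.set j ((i : Int) - (j : Int))) := by
        refine ⟨fun p hp' => h1 p (by simp [hp']),
          h2.of_cons, h3.of_cons,
          fun p hp' k hk1 hk2 => h4 p (by simp [hp']) k hk1 hk2,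
          by simpa using h5', ?_⟩
        intro j' hj' hnot
        by_cases hjj : j' = j
        · subst hjj
          rw [pvGetD_set_self _ _ _ (by omega)]
          have hfp : fpop pop nums j' = i := by
            unfold fpop
            refine fpAux_found pop nums _ i hi (by rw [← hv]; exact hp) _ _ (by omega) (by omega) ?_
            intro k hk1 hk2
            have := h4 (v, j') (by simp) k (by omega) (by omega)
            rwa [hv] at this
          rw [hfp]
        · rw [pvGetD_set_ne _ _ _ _ (fun he => hjj he.symm)]
          refine h6 j' hj' ?_
          intro p hp''
          rcases List.mem_cons.mp hp'' with he | hm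
          · rw [he]; exact fun hc => hjj hc.symm
          · exact hnot p hm
      obtain ⟨mem', inv'⟩ := ih _ harr'
      exact ⟨fun p hp' => ⟨List.mem_cons_of_mem _ (mem' p hp').1, (mem' p hp').2⟩, inv'⟩
    · -- head survives: everything stays
      simp only [popPhase, hp]
      refine ⟨?_, h1, h2, h3, h4, h5, h6⟩
      intro p hp'
      rcases List.mem_cons.mp hp' with he | hm
      · exact ⟨hp', by rw [he]; simpa using hp⟩
      · refine ⟨hp', ?_⟩
        have hvp : pop v p.1 = false := (List.pairwise_cons.mp h3).1 p hm
        exact Htr _ _ _ (by simpa using hp) hvp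

theorem FInv_step (pop : Int → Int → Bool) (nums : List Int)
    (Htr : ∀ a b c : Int, pop a b = false → pop b c = false → pop a c = false)
    (i : Nat) (hi : i < nums.length) (s : List (Int × Nat) × List Int)
    (h : FInv pop nums i s) : FInv pop nums (i + 1) (fwdStep pop nums s i) := by
  obtain ⟨stk, arr⟩ := s
  obtain ⟨hmem, hinv⟩ := popPhase_fwd pop nums Htr i hi stk arr h
  obtain ⟨h1, h2, h3, h4, h5, h6⟩ := hinv
  show FInv pop nums (i + 1)
    ((nums.getD i 0, i) :: (popPhase pop (nums.getD i 0) (fun j => (i : Int) - (j : Int)) stk arr).1,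
      (popPhase pop (nums.getD i 0) (fun j => (i : Int) - (j : Int)) stk arr).2)
  set t := popPhase pop (nums.getD i 0) (fun j => (i : Int) - (j : Int)) stk arr with ht
  refine ⟨?_, ?_, ?_, ?_, h5, ?_⟩
  · intro p hp
    rcases List.mem_cons.mp hp with he | hm
    · rw [he]; exact ⟨by omega, rfl⟩
    · exact ⟨by have := (h1 p hm).1; omega, (h1 p hm).2⟩
  · exact List.pairwise_cons.mpr ⟨fun p hp => (h1 p hp).1, h2⟩
  · exact List.pairwise_cons.mpr ⟨fun p hp => (hmem p hp).2, h3⟩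
  · intro p hp k hk1 hk2
    rcases List.mem_cons.mp hp with he | hm
    · rw [he] at hk1 ⊢; omega
    · rcases Nat.lt_succ_iff_lt_or_eq.mp hk2 with h | h
      · exact h4 p hm k hk1 h
      · rw [h]; exact (hmem p hm).2
  · intro j hj hnot
    have hji : j < i := by
      rcases Nat.lt_succ_iff_lt_or_eq.mp hj with h | h
      · exact h
      · exact absurd h.symm (hnot (nums.getD i 0, i) (List.mem_cons_self))
    exact h6 j hji (fun p hp => hnot p (List.mem_cons_of_mem _ hp))

theorem FInv_loop (pop : Int → Int → Bool) (nums : List Int)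
    (Htr : ∀ a b c : Int, pop a b = false → pop b c = false → pop a c = false) :
    ∀ i, i ≤ nums.length →
      FInv pop nums i ((List.range i).foldl (fwdStep pop nums)
        ([], List.replicate nums.length 0)) := by
  intro i
  induction i with
  | zero =>
    intro _
    refine ⟨by simp, by simp, by simp, by simp, by simp, ?_⟩
    intro j hj; omega
  | succ i ih =>
    intro hle
    rw [List.range_succ, List.foldl_append, List.foldl_cons, List.foldl_nil]
    exact FInv_step pop nums Htr i (by omega) _ (ih (by omega))

theorem popPhase_fwd_flush (pop : Int → Int → Bool) (nums : List Int) :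
    ∀ stk arr, FInv pop nums nums.length (stk, arr) →
      ∀ j, j < nums.length →
        (popPhase (fun _ _ => true) 0 (fun j => (nums.length : Int) - (j : Int)) stk arr).2.getD j 0
          = (fpop pop nums j : Int) - (j : Int) := by
  intro stk
  induction stk with
  | nil =>
    intro arr h j hj
    exact h.2.2.2.2.2 j hj (by simp)
  | cons hd tl ih =>
    intro arr h j hj
    obtain ⟨h1, h2, h3, h4, h5, h6⟩ := h
    obtain ⟨v, j0⟩ := hd
    have h5' : arr.length = nums.length := h5
    simp only [popPhase, if_true]
    have hj0 : j0 < nums.length := (h1 (v, j0) (by simp)).1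
    have hv : v = nums.getD j0 0 := (h1 (v, j0) (by simp)).2
    refine ih _ ⟨fun p hp => h1 p (by simp [hp]), h2.of_cons, h3.of_cons,
      fun p hp k hk1 hk2 => h4 p (by simp [hp]) k hk1 hk2, by simpa using h5', ?_⟩ j hj
    intro j' hj' hnot
    by_cases hjj : j' = j0
    · subst hjj
      rw [pvGetD_set_self _ _ _ (by omega)]
      have hfp : fpop pop nums j' = nums.length := by
        unfold fpop
        refine fpAux_none pop nums _ _ _ (by omega) ?_
        intro k hk1 hk2
        have := h4 (v, j') (by simp) k (by omega) hk2
        rwa [hv] at this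
      rw [hfp]
    · rw [pvGetD_set_ne _ _ _ _ (fun he => hjj he.symm)]
      refine h6 j' hj' ?_
      intro p hp
      rcases List.mem_cons.mp hp with he | hm
      · rw [he]; exact fun hc => hjj hc.symm
      · exact hnot p hm

theorem rightRangeA_spec (pop : Int → Int → Bool) (nums : List Int)
    (Htr : ∀ a b c : Int, pop a b = false → pop b c = false → pop a c = false)
    (j : Nat) (hj : j < nums.length) :
    (rightRangeA pop nums).getD j 0 = (fpop pop nums j : Int) - (j : Int) := by
  unfold rightRangeA
  exact popPhase_fwd_flush pop nums _ _ (FInv_loop pop nums Htr nums.length le_rfl) j hj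

-- loop invariant of A's backward pass (the state after processing indices ≥ i)
def BInv (pop : Int → Int → Bool) (nums : List Int) (i : Nat)
    (s : List (Int × Nat) × List Int) : Prop :=
  (∀ p ∈ s.1, i ≤ p.2 ∧ p.2 < nums.length ∧ p.1 = nums.getD p.2 0) ∧
  s.1.Pairwise (fun a b => a.2 < b.2) ∧
  s.1.Pairwise (fun a b => pop a.1 b.1 = false) ∧
  (∀ p ∈ s.1, ∀ k, i ≤ k → k < p.2 → pop (nums.getD k 0) p.1 = false) ∧
  s.2.length = nums.length ∧
  (∀ j, i ≤ j → j < nums.length → (∀ p ∈ s.1, p.2 ≠ j) →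
    s.2.getD j 0 = (j : Int) - gpop pop nums j)

theorem popPhase_bwd (pop : Int → Int → Bool) (nums : List Int)
    (Htr : ∀ a b c : Int, pop a b = false → pop b c = false → pop a c = false)
    (i : Nat) :
    ∀ stk arr, BInv pop nums (i + 1) (stk, arr) →
      (∀ p ∈ (popPhase pop (nums.getD i 0) (fun j => (j : Int) - (i : Int)) stk arr).1,
          p ∈ stk ∧ pop (nums.getD i 0) p.1 = false) ∧
      BInv pop nums (i + 1) (popPhase pop (nums.getD i 0) (fun j => (j : Int) - (i : Int)) stk arr) := by
  intro stk
  induction stk with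
  | nil =>
    intro arr h
    exact ⟨by simp [popPhase], by simpa [popPhase] using h⟩
  | cons hd tl ih =>
    intro arr h
    obtain ⟨h1, h2, h3, h4, h5, h6⟩ := h
    obtain ⟨v, j⟩ := hd
    have h5' : arr.length = nums.length := h5
    by_cases hp : pop (nums.getD i 0) v = true
    · -- head is popped
      simp only [popPhase, hp, if_true]
      have hj : i + 1 ≤ j := (h1 (v, j) (by simp)).1
      have hjn : j < nums.length := (h1 (v, j) (by simp)).2.1
      have hv : v = nums.getD j 0 := (h1 (v, j) (by simp)).2.2
      have harr' : BInv pop nums (i + 1) (tl, arr.set j ((j : Int) - (i : Int))) := by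
        refine ⟨fun p hp' => h1 p (by simp [hp']),
          h2.of_cons, h3.of_cons,
          fun p hp' k hk1 hk2 => h4 p (by simp [hp']) k hk1 hk2,
          by simpa using h5', ?_⟩
        intro j' hj1 hj2 hnot
        by_cases hjj : j' = j
        · subst hjj
          rw [pvGetD_set_self _ _ _ (by omega)]
          have hfp : gpop pop nums j' = (i : Int) := by
            unfold gpop
            refine gpAux_found pop nums _ i (by rw [← hv]; exact hp) _ (by omega) ?_
            intro t ht1 ht2
            have := h4 (v, j') (by simp) t (by omega) ht2
            rwa [hv] at this
          rw [hfp]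
        · rw [pvGetD_set_ne _ _ _ _ (fun he => hjj he.symm)]
          refine h6 j' hj1 hj2 ?_
          intro p hp''
          rcases List.mem_cons.mp hp'' with he | hm
          · rw [he]; exact fun hc => hjj hc.symm
          · exact hnot p hm
      obtain ⟨mem', inv'⟩ := ih _ harr'
      exact ⟨fun p hp' => ⟨List.mem_cons_of_mem _ (mem' p hp').1, (mem' p hp').2⟩, inv'⟩
    · -- head survives
      simp only [popPhase, hp]
      refine ⟨?_, h1, h2, h3, h4, h5, h6⟩
      intro p hp'
      rcases List.mem_cons.mp hp' with he | hm
      · exact ⟨hp', by rw [he]; simpa using hp⟩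
      · refine ⟨hp', ?_⟩
        have hvp : pop v p.1 = false := (List.pairwise_cons.mp h3).1 p hm
        exact Htr _ _ _ (by simpa using hp) hvp

theorem BInv_step (pop : Int → Int → Bool) (nums : List Int)
    (Htr : ∀ a b c : Int, pop a b = false → pop b c = false → pop a c = false)
    (i : Nat) (hi : i < nums.length) (s : List (Int × Nat) × List Int)
    (h : BInv pop nums (i + 1) s) : BInv pop nums i (bwdStep pop nums s i) := by
  obtain ⟨stk, arr⟩ := s
  obtain ⟨hmem, hinv⟩ := popPhase_bwd pop nums Htr i stk arr h
  obtain ⟨h1, h2, h3, h4, h5, h6⟩ := hinv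
  show BInv pop nums i
    ((nums.getD i 0, i) :: (popPhase pop (nums.getD i 0) (fun j => (j : Int) - (i : Int)) stk arr).1,
      (popPhase pop (nums.getD i 0) (fun j => (j : Int) - (i : Int)) stk arr).2)
  set t := popPhase pop (nums.getD i 0) (fun j => (j : Int) - (i : Int)) stk arr with ht
  refine ⟨?_, ?_, ?_, ?_, h5, ?_⟩
  · intro p hp
    rcases List.mem_cons.mp hp with he | hm
    · rw [he]; exact ⟨le_rfl, hi, rfl⟩
    · obtain ⟨ha, hb, hc⟩ := h1 p hm
      exact ⟨by omega, hb, hc⟩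
  · exact List.pairwise_cons.mpr ⟨fun p hp => by have := (h1 p hp).1; omega, h2⟩
  · exact List.pairwise_cons.mpr ⟨fun p hp => (hmem p hp).2, h3⟩
  · intro p hp k hk1 hk2
    rcases List.mem_cons.mp hp with he | hm
    · rw [he] at hk2 ⊢; omega
    · rcases Nat.eq_or_lt_of_le hk1 with h | h
      · rw [← h]; exact (hmem p hm).2
      · exact h4 p hm k h hk2
  · intro j hj1 hj2 hnot
    have hji : i + 1 ≤ j := by
      rcases Nat.eq_or_lt_of_le hj1 with h | h
      · exact absurd h (hnot (nums.getD i 0, i) (List.mem_cons_self))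
      · omega
    exact h6 j hji hj2 (fun p hp => hnot p (List.mem_cons_of_mem _ hp))

theorem BInv_loop (pop : Int → Int → Bool) (nums : List Int)
    (Htr : ∀ a b c : Int, pop a b = false → pop b c = false → pop a c = false) :
    ∀ m, m ≤ nums.length →
      BInv pop nums (nums.length - m)
        (((List.range' (nums.length - m) m).reverse).foldl (bwdStep pop nums)
          ([], List.replicate nums.length 0)) := by
  intro m
  induction m with
  | zero =>
    intro _
    refine ⟨by simp, by simp, by simp, by simp, by simp, ?_⟩
    intro j hj1 hj2 _; omega
  | succ m ih =>
    intro hle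
    have hi : nums.length - (m + 1) < nums.length := by omega
    have hsplit : List.range' (nums.length - (m + 1)) (m + 1)
        = (nums.length - (m + 1)) :: List.range' (nums.length - m) m := by
      have h1 : nums.length - m = nums.length - (m + 1) + 1 := by omega
      rw [List.range'_succ, h1]
    rw [hsplit, List.reverse_cons, List.foldl_append, List.foldl_cons, List.foldl_nil]
    have := BInv_step pop nums Htr (nums.length - (m + 1)) hi _ (by
      have h := ih (by omega)
      have he : nums.length - (m + 1) + 1 = nums.length - m := by omega
      rw [he]
      exact h)
    exact this

theorem popPhase_bwd_flush (pop : Int → Int → Bool) (nums : List Int) :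
    ∀ stk arr, BInv pop nums 0 (stk, arr) →
      ∀ j, j < nums.length →
        (popPhase (fun _ _ => true) 0 (fun j => (j : Int) + 1) stk arr).2.getD j 0
          = (j : Int) - gpop pop nums j := by
  intro stk
  induction stk with
  | nil =>
    intro arr h j hj
    exact h.2.2.2.2.2 j (by omega) hj (by simp)
  | cons hd tl ih =>
    intro arr h j hj
    obtain ⟨h1, h2, h3, h4, h5, h6⟩ := h
    obtain ⟨v, j0⟩ := hd
    have h5' : arr.length = nums.length := h5
    simp only [popPhase, if_true]
    have hj0 : j0 < nums.length := (h1 (v, j0) (by simp)).2.1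
    have hv : v = nums.getD j0 0 := (h1 (v, j0) (by simp)).2.2
    refine ih _ ⟨fun p hp => h1 p (by simp [hp]), h2.of_cons, h3.of_cons,
      fun p hp k hk1 hk2 => h4 p (by simp [hp]) k hk1 hk2, by simpa using h5', ?_⟩ j hj
    intro j' _ hj2 hnot
    by_cases hjj : j' = j0
    · subst hjj
      rw [pvGetD_set_self _ _ _ (by omega)]
      have hfp : gpop pop nums j' = -1 := by
        unfold gpop
        refine gpAux_none pop nums _ _ ?_
        intro t ht
        have := h4 (v, j') (by simp) t (by omega) ht
        rwa [hv] at this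
      rw [hfp]
      ring
    · rw [pvGetD_set_ne _ _ _ _ (fun he => hjj he.symm)]
      refine h6 j' (by omega) hj2 ?_
      intro p hp''
      rcases List.mem_cons.mp hp'' with he | hm
      · rw [he]; exact fun hc => hjj hc.symm
      · exact hnot p hm

theorem leftRangeA_spec (pop : Int → Int → Bool) (nums : List Int)
    (Htr : ∀ a b c : Int, pop a b = false → pop b c = false → pop a c = false)
    (j : Nat) (hj : j < nums.length) :
    (leftRangeA pop nums).getD j 0 = (j : Int) - gpop pop nums j := by
  unfold leftRangeA
  have h := BInv_loop pop nums Htr nums.length le_rfl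
  simp only [Nat.sub_self] at h
  rw [← List.range_eq_range'] at h
  exact popPhase_bwd_flush pop nums _ _ h j hj

theorem Htr_popRight (g : Bool) :
    ∀ a b c : Int, popRight g a b = false → popRight g b c = false → popRight g a c = false := by
  intro a b c
  cases g <;> simp [popRight] <;> omega

theorem Htr_popLeft (g : Bool) :
    ∀ a b c : Int, popLeft g a b = false → popLeft g b c = false → popLeft g a c = false := by
  intro a b c
  cases g <;> simp [popLeft] <;> omega

-- ===== VERDICT (by name: the statement is the Claim_ definition above) =====
theorem caculateSubArraySum_spec : Claim_equal_caculateSubArraySum := by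
  intro nums g _
  unfold Spec_caculateSubArraySum
  simp only [caculateSubArraySum, caculateSubArraySum_alt]
  refine PySem.List.foldl_congr_mem _ _ _ _ ?_
  intro acc i hi
  have hin : i < nums.length := List.mem_range.mp hi
  rw [leftRangeA_spec _ _ (Htr_popLeft g) i hin,
    rightRangeA_spec _ _ (Htr_popRight g) i hin,
    scanL_eq_gpAux, scanR_eq_fpAux]
  rfl
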